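-- pv_equiv track=rewrite | github.com/Spambuddy/Club-Recommendation-System | club_functions.py | get_last_to_first
-- ===== SOURCE A (Python) =====
-- from typing import List, Tuple, Dict, TextIO
--
-- def convert_list_to_tuples(lst: List[str]) -> List[str]:
--     """
--     >>> convert_list_to_tuples(['Jesse Katsopolis', 'Danny R Tanner',
--     'Joey Gladstone','Rebecca Donaldson-Katsopolis'])
--     [('Jesse', 'Katsopolis'), ('Danny R', 'Tanner'), ('Joey'
--     """
--     new_lst = []
--     for i in lst:
--         new_lst.append(convert_name(i))
--
--     return new_lst
--
-- def convert_name(name: str) -> Tuple[str, str]: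
--     """
--     >>> convert_name("Kimmy Raikonnen")
--     ('Raikonnen', 'Kimmy')
--     """
--     i = len(name) - 1
--
--     while i >= 0 and name[i] != ' ':
--         i -= 1
--
--     first_name = name[:i]
--     last_name = name[i + 1:]
--
--     return (last_name, first_name)
--
-- def get_last_to_first(
--         person_to_friends: Dict[str, List[str]]) -> Dict[str, List[str]]:
--     """Return a "last name to first name(s)" dictionary with the people from the
--     "person to friends" dictionary person_to_friends.
--
--     >>> get_last_to_first(P2F) == {
--     ...    'Katsopolis': ['Jesse'],
--     ...    'Tanner': ['Danny R', 'Michelle', 'Stephanie J'],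
--     ...    'Gladstone': ['Joey'],
--     ...    'Donaldson-Katsopolis': ['Rebecca'],
--     ...    'Gibbler': ['Kimmy'],
--     ...    'Tanner-Fuller': ['DJ']}
--     True
--     """
--     # A:first put the names out into a list
--     # convert all names into tuple (last_name, first_name) format and keep it in
--     #    the list (call this tuples_lst)
--     # create list of last names
--     # parse through tuples_lst using last names: for every tuple with the same
--     #    last_name, add that value to a list
--     # append that list to a dictionary
--
--     # A:
--     lst = []
--     for x in person_to_friends:
--         if not (x in lst):
--             lst.append(x)
--         for y in person_to_friends[x]:
--             if not (y in lst):
--                 lst.append(y)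
--
--     # B:
--     tuples_lst = convert_list_to_tuples(lst)
--
--     # C:
--     list_of_last_names = []
--     for i in tuples_lst:
--         if not (i[0] in list_of_last_names):
--             list_of_last_names.append(i[0])
--
--     # Di:
--     mega_lst = []
--     for r in range(len(list_of_last_names)):
--         mega_lst.append([])
--
--     # Dii
--     for r in range(len(list_of_last_names)):
--         for i in tuples_lst:
--             if i[0] == list_of_last_names[r]:
--                 mega_lst[r].append(i[1])
--
--     # E
--     d = {}
--
--     for r in range(len(list_of_last_names)):
--         d[list_of_last_names[r]] = mega_lst[r]
--         d[list_of_last_names[r]].sort()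
--
--
--     return d
-- ===== SOURCE B (Python) =====
-- def _split_name(name):
--     i = name.rfind(' ')
--     return name[i + 1:], name[:i]
--
-- def get_last_to_first(person_to_friends):
--     seen = set()
--     groups = {}
--     for person, friends in person_to_friends.items():
--         for name in [person] + friends:
--             if name not in seen:
--                 seen.add(name)
--                 last, first = _split_name(name)
--                 groups.setdefault(last, []).append(first)
--     return {last: sorted(firsts) for last, firsts in groups.items()}
-- ===== Notes on version B (the rewrite author's own statement) =====
-- stated objective: faster
-- what changed: Replaces A's five quadratic passes (list-membership dedup, tuple list, last-name list, per-last-name rescans of all tuples) by a single traversal that dedups via a set and groups first names into a dict with setdefault, then sorts each group.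
import Mathlib
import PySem

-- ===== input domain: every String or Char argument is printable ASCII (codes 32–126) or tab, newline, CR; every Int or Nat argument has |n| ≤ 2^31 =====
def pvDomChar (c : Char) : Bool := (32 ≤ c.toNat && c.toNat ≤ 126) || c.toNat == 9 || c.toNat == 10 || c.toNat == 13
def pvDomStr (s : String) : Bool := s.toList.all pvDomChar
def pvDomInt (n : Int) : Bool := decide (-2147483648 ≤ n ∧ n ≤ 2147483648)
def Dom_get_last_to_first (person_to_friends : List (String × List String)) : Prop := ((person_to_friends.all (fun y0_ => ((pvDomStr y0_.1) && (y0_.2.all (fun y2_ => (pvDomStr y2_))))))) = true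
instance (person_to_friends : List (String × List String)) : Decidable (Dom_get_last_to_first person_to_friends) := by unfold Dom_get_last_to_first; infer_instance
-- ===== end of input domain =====

-- B replaces A's five quadratic passes by one dedup-and-group traversal (set + dict of lists), then sorts each group;
-- return-value equivalence (the Python argument is a dict, modelled as an association list normalised by Dict.ofList).

-- ===== PORT A =====
-- while i >= 0 and name[i] != ' ': i -= 1   (i ranges over n-1, …, 0; argument is i+1)
def convert_name_loop (cs : List Char) : Nat → Int
  | 0 => -1
  | n + 1 => if cs.getD n ' ' ≠ ' ' then convert_name_loop cs n else (n : Int)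

def convert_name (name : String) : String × String :=
  let i := convert_name_loop name.toList name.toList.length
  let first_name := PySem.Str.slice name none (some i)
  let last_name := PySem.Str.slice name (some (i + 1)) none
  (last_name, first_name)

def convert_list_to_tuples (lst : List String) : List (String × String) :=
  lst.foldl (fun new_lst i => new_lst ++ [convert_name i]) []

def get_last_to_first (person_to_friends : List (String × List String)) : List (String × List String) :=
  let pf := PySem.Dict.ofList person_to_friends
  -- A: dedup all names into lst (person_to_friends[x] cannot raise: x is a key)
  let lst := pf.keys.foldl (fun lst x =>
    let lst := if x ∈ lst then lst else lst ++ [x]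
    (pf.getD x []).foldl (fun lst y => if y ∈ lst then lst else lst ++ [y]) lst) []
  -- B:
  let tuples_lst := convert_list_to_tuples lst
  -- C:
  let list_of_last_names := tuples_lst.foldl (fun acc i => if i.1 ∈ acc then acc else acc ++ [i.1]) []
  -- Di:
  let mega0 := (PySem.List.pyRange 0 (list_of_last_names.length : Int) 1).foldl
    (fun m _ => m ++ [([] : List String)]) []
  -- Dii:
  let mega := (PySem.List.pyRange 0 (list_of_last_names.length : Int) 1).foldl (fun m r =>
    tuples_lst.foldl (fun m i =>
      if i.1 = PySem.List.pyGetD list_of_last_names r "" then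
        PySem.List.pySetD m r (PySem.List.pyGetD m r [] ++ [i.2])
      else m) m) mega0
  -- E: d[last] = mega[r]; d[last].sort()
  let d := (PySem.List.pyRange 0 (list_of_last_names.length : Int) 1).foldl (fun d r =>
    let d' := d.insert (PySem.List.pyGetD list_of_last_names r "") (PySem.List.pyGetD mega r [])
    d'.modify (PySem.List.pyGetD list_of_last_names r "") [] (fun v => PySem.List.sorted v (fun x => x) false))
    PySem.Dict.empty
  d.items

-- ===== PORT B =====
def split_name (name : String) : String × String :=
  let i := PySem.Str.rfind name " "
  (PySem.Str.slice name (some (i + 1)) none, PySem.Str.slice name none (some i))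

def get_last_to_first_alt (person_to_friends : List (String × List String)) : List (String × List String) :=
  let pf := PySem.Dict.ofList person_to_friends
  -- one pass: dedup via a set, group first names per last name (setdefault+append = modify)
  let st := pf.items.foldl (fun (st : PySem.Set String × PySem.Dict String (List String)) p =>
    (p.1 :: p.2).foldl (fun st name =>
      if name ∈ st.1 then st
      else
        (PySem.Set.add st.1 name,
         st.2.modify (split_name name).1 [] (fun v => v ++ [(split_name name).2]))) st)
    (PySem.Set.empty, PySem.Dict.empty)
  st.2.items.map (fun p => (p.1, PySem.List.sorted p.2 (fun x => x) false))

-- ===== PRECONDITION & SPEC =====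
def Spec_get_last_to_first (person_to_friends : List (String × List String)) (out : List (String × List String)) : Prop := out = get_last_to_first_alt person_to_friends
instance (person_to_friends : List (String × List String)) (out : List (String × List String)) : Decidable (Spec_get_last_to_first person_to_friends out) := by unfold Spec_get_last_to_first; infer_instance

-- ===== CLAIM (what is proved, stated in full; the proofs are below) =====
def Claim_equal_get_last_to_first : Prop := ∀ (person_to_friends : List (String × List String)), Dom_get_last_to_first person_to_friends → Spec_get_last_to_first person_to_friends (get_last_to_first person_to_friends)

-- ===== LEMMAS AND PROOFS =====

-- ## the two name-splitting routines agree

theorem isPrefixOf_space (cs : List Char) (n : Nat) (h : n < cs.length) :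
    [' '].isPrefixOf (cs.drop n) = (cs.getD n ' ' == ' ') := by
  rw [List.drop_eq_getElem_cons h]
  simp [List.isPrefixOf, List.getD, BEq.comm, List.getElem?_eq_getElem h]

theorem loop_eq_go (cs : List Char) :
    ∀ n, n ≤ cs.length →
      PySem.Chars.rfind.go cs [' '] n =
        if [' '].isPrefixOf (cs.drop n) then (n : Int) else convert_name_loop cs n := by
  intro n
  induction n with
  | zero => intro _; simp [PySem.Chars.rfind.go, convert_name_loop]
  | succ n ih =>
    intro h
    rw [PySem.Chars.rfind.go]
    by_cases hp : [' '].isPrefixOf (cs.drop (n+1)) = true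
    · simp [hp]
    · simp only [eq_false_of_ne_true hp, if_false, Bool.false_eq_true]
      rw [ih (by omega), convert_name_loop]
      rw [isPrefixOf_space cs n (by omega)]
      by_cases hq : cs.getD n ' ' = ' ' <;> simp

theorem loop_eq_rfind (cs : List Char) :
    convert_name_loop cs cs.length = PySem.Chars.rfind cs [' '] := by
  rw [PySem.Chars.rfind, loop_eq_go cs cs.length le_rfl]
  simp

theorem convert_name_eq_split_name (name : String) : convert_name name = split_name name := by
  have h : convert_name_loop name.toList name.toList.length = PySem.Str.rfind name " " := by
    rw [loop_eq_rfind]; simp [PySem.Str.rfind]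
  simp only [convert_name, split_name, h]

-- ## A's dedup loop produces the set of all names in traversal order

theorem foldl_update_flatMap {α β : Type} [BEq α] (g : β → List α) (l : List β) (s : PySem.Set α) :
    l.foldl (fun s p => PySem.Set.update s (g p)) s = PySem.Set.update s (l.flatMap g) := by
  induction l generalizing s with
  | nil => simp [PySem.Set.update]
  | cons p l ih => rw [List.foldl_cons, ih, List.flatMap_cons, PySem.Set.update_append]

theorem dedup_fold_eq_set (pf : PySem.Dict String (List String)) (h : pf.keys.Nodup) :
    pf.keys.foldl (fun lst x =>
      let lst := if x ∈ lst then lst else lst ++ [x]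
      (pf.getD x []).foldl (fun lst y => if y ∈ lst then lst else lst ++ [y]) lst) [] =
    PySem.Set.ofList (pf.items.flatMap (fun p => p.1 :: p.2)) := by
  simp only [← PySem.Set.add_eq_ite]
  simp only [PySem.Dict.keys] at *
  simp only [List.foldl_map]
  rw [PySem.List.foldl_congr_mem pf.items _ (fun s p => PySem.Set.update s (p.1 :: p.2)) []
    (by
      intro acc p hp
      have hg : pf.getD p.1 [] = p.2 :=
        PySem.Dict.getD_of_mem_items pf hp (by simpa [PySem.Dict.keys] using h) []
      simp only [hg, PySem.Set.update_cons]
      rfl)]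
  rw [foldl_update_flatMap, PySem.Set.update_nil_left]

-- ## B's single pass: dedup + grouping

def stepD (d : PySem.Dict String (List String)) (name : String) : PySem.Dict String (List String) :=
  d.modify (split_name name).1 [] (fun v => v ++ [(split_name name).2])

def stepB (st : PySem.Set String × PySem.Dict String (List String)) (name : String) :
    PySem.Set String × PySem.Dict String (List String) :=
  if name ∈ st.1 then st else (PySem.Set.add st.1 name, stepD st.2 name)

theorem drop_update_cons (s : PySem.Set String) (name : String) (ns : List String) :
    (PySem.Set.update (s ++ [name]) ns).drop s.length =
      name :: (PySem.Set.update (s ++ [name]) ns).drop (s.length + 1) := by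
  rw [PySem.Set.update_eq_append_filter]
  rw [List.append_assoc]
  rw [List.drop_left]
  have h : s.length + 1 = (s ++ [name]).length := by simp
  rw [h, ← List.append_assoc, List.drop_left]
  simp

theorem inner_fold_eq (ns : List String) : ∀ (s : PySem.Set String) (d : PySem.Dict String (List String)),
    s.Nodup →
    ns.foldl stepB (s, d) =
      (PySem.Set.update s ns, ((PySem.Set.update s ns).drop s.length).foldl stepD d) := by
  induction ns with
  | nil => intro s d _; simp [PySem.Set.update, List.drop_length]
  | cons name ns ih =>
    intro s d hs
    rw [List.foldl_cons, PySem.Set.update_cons]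
    by_cases hm : name ∈ s
    · rw [show stepB (s, d) name = (s, d) by simp [stepB, hm]]
      rw [PySem.Set.add_of_mem hm]
      exact ih s d hs
    · rw [show stepB (s, d) name = (s ++ [name], stepD d name) by
        simp [stepB, hm]]
      rw [PySem.Set.add_of_not_mem hm]
      rw [ih (s ++ [name]) (stepD d name) (by simp [List.Nodup.append, hs, hm, List.disjoint_singleton])]
      rw [drop_update_cons s name ns, List.foldl_cons]
      simp

theorem outer_fold_eq (l : List (String × List String)) :
    ∀ (s : PySem.Set String) (d : PySem.Dict String (List String)), s.Nodup →
    l.foldl (fun st p => (p.1 :: p.2).foldl stepB st) (s, d) =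
      (PySem.Set.update s (l.flatMap (fun p => p.1 :: p.2)),
       ((PySem.Set.update s (l.flatMap (fun p => p.1 :: p.2))).drop s.length).foldl stepD d) := by
  induction l with
  | nil => intro s d _; simp [PySem.Set.update, List.drop_length]
  | cons p l ih =>
    intro s d hs
    rw [List.foldl_cons, inner_fold_eq _ s d hs, List.flatMap_cons, PySem.Set.update_append]
    set s' := PySem.Set.update s (p.1 :: p.2) with hs'
    rw [ih s' _ (PySem.Set.nodup_update _ _ hs)]
    obtain ⟨t1, ht1⟩ : ∃ t1, s' = s ++ t1 := ⟨_, PySem.Set.update_eq_append_filter s _⟩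
    obtain ⟨t2, ht2⟩ : ∃ t2, PySem.Set.update s' (l.flatMap (fun p => p.1 :: p.2)) = s' ++ t2 :=
      ⟨_, PySem.Set.update_eq_append_filter s' _⟩
    rw [ht2, ht1]
    rw [List.append_assoc]
    have e1 : List.drop (s ++ t1).length (s ++ (t1 ++ t2)) = t2 := by
      rw [← List.append_assoc]; exact List.drop_left
    have e2 : List.drop s.length (s ++ (t1 ++ t2)) = t1 ++ t2 := List.drop_left
    rw [e1, e2, List.foldl_append, List.drop_left]

theorem stepD_items (L : List String) :
    (L.foldl stepD PySem.Dict.empty).items =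
      (PySem.Set.ofList (L.map (fun n => (split_name n).1))).map
        (fun k => (k, ((L.map split_name).filter (fun p => p.1 == k)).map (fun x => x.2))) := by
  have hk : (L.foldl stepD PySem.Dict.empty).keys =
      PySem.Set.ofList (L.map (fun n => (split_name n).1)) := by
    have h := PySem.Dict.keys_foldl_modify_key L (fun n => (split_name n).1) []
      (fun _ n v => v ++ [(split_name n).2]) PySem.Dict.empty
    rw [show (L.foldl (fun d x => d.modify ((split_name x).1) []
        ((fun (_ : PySem.Dict String (List String)) n v => v ++ [(split_name n).2]) d x)) PySem.Dict.empty)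
      = L.foldl stepD PySem.Dict.empty from rfl] at h
    rw [h]
    rw [show (PySem.Dict.empty : PySem.Dict String (List String)).keys = [] from rfl]
    rw [PySem.Set.update_nil_left]
  have hnd : (L.foldl stepD PySem.Dict.empty).keys.Nodup := by
    rw [hk]; exact PySem.Set.nodup_ofList _
  rw [PySem.Dict.items_eq_map_keys _ hnd [], hk]
  apply List.map_congr_left
  intro k _
  have h := PySem.Dict.getD_foldl_modify_append (L.map split_name) PySem.Dict.empty k
  rw [List.foldl_map] at h
  have h2 : (L.foldl stepD PySem.Dict.empty).getD k [] =
      PySem.Dict.empty.getD k [] ++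
        ((L.map split_name).filter (fun p => p.1 == k)).map (fun x => x.2) := h
  rw [h2, PySem.Dict.getD_empty, List.nil_append]

-- ## A's phases C, Di, Dii, E

theorem lastnames_eq (T : List (String × String)) :
    T.foldl (fun acc i => if i.1 ∈ acc then acc else acc ++ [i.1]) [] =
      PySem.Set.ofList (T.map (fun i => i.1)) := by
  simp only [← PySem.Set.add_eq_ite]
  rw [← PySem.Set.update_map_eq_foldl_add, PySem.Set.update_nil_left]

theorem getD_set_self (m : List (List String)) (j : Nat) (v : List String) (h : j < m.length) :
    (m.set j v).getD j [] = v := by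
  simp [List.getD_eq_getElem?_getD, h]

theorem getD_set_ne (m : List (List String)) (j q : Nat) (h : q ≠ j) (v : List String) :
    (m.set j v).getD q [] = m.getD q [] := by
  simp [List.getD_eq_getElem?_getD, List.getElem?_set_ne (Ne.symm h)]

theorem set_getD_eq_self (m : List (List String)) (j : Nat) (h : j < m.length) :
    m.set j (m.getD j []) = m := by
  simp [List.getD_eq_getElem?_getD, List.getElem?_eq_getElem h]

theorem inner_set (T : List (String × String)) (k : String) :
    ∀ (m : List (List String)) (j : Nat), j < m.length →
    T.foldl (fun m i => if i.1 = k then m.set j (m.getD j [] ++ [i.2]) else m) m =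
      m.set j (m.getD j [] ++ (T.filter (fun i => i.1 == k)).map (fun i => i.2)) := by
  induction T with
  | nil => intro m j hj; simpa using (set_getD_eq_self m j hj).symm
  | cons i T ih =>
    intro m j hj
    rw [List.foldl_cons]
    by_cases hik : i.1 = k
    · rw [if_pos hik]
      rw [ih (m.set j (m.getD j [] ++ [i.2])) j (by simpa using hj)]
      rw [getD_set_self m j _ hj, List.set_set]
      rw [List.filter_cons_of_pos (by simpa using hik), List.map_cons]
      simp
    · rw [if_neg hik, ih m j hj, List.filter_cons_of_neg (by simpa using hik)]

theorem dii_getD (T : List (String × String)) (K : Nat → String) :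
    ∀ (rs : List Nat) (m : List (List String)), rs.Nodup → (∀ r ∈ rs, r < m.length) →
    ∀ q : Nat,
    (rs.foldl (fun m j =>
        T.foldl (fun m i => if i.1 = K j then m.set j (m.getD j [] ++ [i.2]) else m) m) m).getD q [] =
      if q ∈ rs then m.getD q [] ++ (T.filter (fun i => i.1 == K q)).map (fun i => i.2)
      else m.getD q [] := by
  intro rs
  induction rs with
  | nil => intro m _ _ q; simp
  | cons r rs ih =>
    intro m hnd hlt q
    rw [List.foldl_cons, inner_set T (K r) m r (hlt r (List.mem_cons_self))]
    set v := m.getD r [] ++ (T.filter (fun i => i.1 == K r)).map (fun i => i.2) with hv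
    have hlen : (m.set r v).length = m.length := by simp
    rw [ih (m.set r v) hnd.of_cons
      (fun r' hr' => by rw [hlen]; exact hlt r' (List.mem_cons_of_mem _ hr')) q]
    by_cases hq : q = r
    · subst hq
      have hqrs : q ∉ rs := (List.nodup_cons.mp hnd).1
      rw [if_neg hqrs, getD_set_self m q v (hlt q (List.mem_cons_self)), hv]
      simp
    · rw [getD_set_ne m r q hq v]
      by_cases hqs : q ∈ rs <;> simp [hqs, hq]

theorem map_getD_range {α : Type} (l : List α) (d : α) :
    (List.range l.length).map (fun j => l.getD j d) = l := by
  apply List.ext_getElem <;>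
    simp only [List.length_map, List.length_range, List.getElem_map, List.getElem_range]

  intro i h1 h2
  simp [List.getD_eq_getElem?_getD, List.getElem?_eq_getElem h2]

theorem phaseE (lastNames : List String) (mega : List (List String)) (hnd : lastNames.Nodup) :
    ((PySem.List.pyRange 0 (lastNames.length : Int) 1).foldl (fun d r =>
      (d.insert (PySem.List.pyGetD lastNames r "") (PySem.List.pyGetD mega r [])).modify
        (PySem.List.pyGetD lastNames r "") [] (fun v => PySem.List.sorted v (fun x => x) false))
      PySem.Dict.empty).items =
    (List.range lastNames.length).map (fun j =>
      (lastNames.getD j "", PySem.List.sorted (mega.getD j []) (fun x => x) false)) := by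
  rw [PySem.List.foldl_congr_mem _ _ (fun d r =>
      d.insert (PySem.List.pyGetD lastNames r "")
        (PySem.List.sorted (PySem.List.pyGetD mega r []) (fun x => x) false)) _
    (by
      intro acc r _
      rw [PySem.Dict.modify, PySem.Dict.getD_insert_self, PySem.Dict.insert_insert_self])]
  rw [PySem.List.pyRange_zero_nat, List.foldl_map]
  simp only [PySem.List.pyGetD_natCast]
  rw [PySem.Dict.items_foldl_insert_fresh (List.range lastNames.length)
    (fun j => lastNames.getD j "") (fun j => PySem.List.sorted (mega.getD j []) (fun x => x) false)
    PySem.Dict.empty (by intro a _; rfl) (by rw [map_getD_range]; exact hnd)]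
  rfl

-- ## assembling the two sides

theorem A_eq (x : List (String × List String)) :
    get_last_to_first x =
      (PySem.Set.ofList
        (((PySem.Set.ofList ((PySem.Dict.ofList x).items.flatMap (fun p => p.1 :: p.2))).map split_name).map
          (fun i => i.1))).map
        (fun k => (k,
          PySem.List.sorted
            ((((PySem.Set.ofList ((PySem.Dict.ofList x).items.flatMap (fun p => p.1 :: p.2))).map split_name).filter
              (fun p => p.1 == k)).map (fun p => p.2)) (fun y => y) false)) := by
  simp only [get_last_to_first, convert_list_to_tuples]
  rw [dedup_fold_eq_set _ (PySem.Dict.nodup_keys_ofList x)]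
  simp only [PySem.List.foldl_append_singleton_eq_map, convert_name_eq_split_name,
    List.nil_append, lastnames_eq]
  set L := PySem.Set.ofList ((PySem.Dict.ofList x).items.flatMap (fun p => p.1 :: p.2)) with hL
  set T := L.map split_name with hT
  set lasts := PySem.Set.ofList (T.map (fun i => i.1)) with hlasts
  simp only [List.map_const', PySem.List.length_pyRange_one, Int.sub_zero, Int.toNat_natCast]
  rw [phaseE lasts _ (PySem.Set.nodup_ofList _)]
  have hmega : (List.foldl (fun m r => T.foldl (fun m i =>
        if i.1 = PySem.List.pyGetD lasts r "" then
          PySem.List.pySetD m r (PySem.List.pyGetD m r [] ++ [i.2]) else m) m)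
      (List.replicate lasts.length []) (PySem.List.pyRange 0 (lasts.length : Int))) =
      (List.range lasts.length).foldl (fun m j => T.foldl (fun m i =>
        if i.1 = lasts.getD j "" then m.set j (m.getD j [] ++ [i.2]) else m) m)
      (List.replicate lasts.length []) := by
    rw [PySem.List.pyRange_zero_nat, List.foldl_map]
    simp only [PySem.List.pyGetD_natCast, PySem.List.pySetD_natCast]
  rw [hmega]
  conv_rhs => rw [← map_getD_range lasts ""]
  rw [List.map_map]
  apply List.map_congr_left
  intro j hj
  have hj' : j < lasts.length := List.mem_range.mp hj
  rw [dii_getD T (fun j => lasts.getD j "") (List.range lasts.length) _ List.nodup_range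
    (by intro r hr; simpa using List.mem_range.mp hr) j]
  rw [if_pos hj]
  simp [List.getD_eq_getElem?_getD, hj']

theorem B_eq (x : List (String × List String)) :
    get_last_to_first_alt x =
      (PySem.Set.ofList
        (((PySem.Set.ofList ((PySem.Dict.ofList x).items.flatMap (fun p => p.1 :: p.2))).map split_name).map
          (fun i => i.1))).map
        (fun k => (k,
          PySem.List.sorted
            ((((PySem.Set.ofList ((PySem.Dict.ofList x).items.flatMap (fun p => p.1 :: p.2))).map split_name).filter
              (fun p => p.1 == k)).map (fun p => p.2)) (fun y => y) false)) := by
  have h0 : get_last_to_first_alt x =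
      ((PySem.Dict.ofList x).items.foldl (fun st p => (p.1 :: p.2).foldl stepB st)
        (PySem.Set.empty, PySem.Dict.empty)).2.items.map
        (fun p => (p.1, PySem.List.sorted p.2 (fun y => y) false)) := rfl
  rw [h0, outer_fold_eq _ PySem.Set.empty PySem.Dict.empty List.nodup_nil]
  simp only [PySem.Set.empty, List.length_nil, List.drop_zero]
  rw [stepD_items]
  simp only [List.map_map]
  rfl

-- ===== VERDICT (by name: the statement is the Claim_ definition above) =====
theorem get_last_to_first_spec : Claim_equal_get_last_to_first := by
  intro x _
  show get_last_to_first x = get_last_to_first_alt x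
  rw [A_eq, B_eq]
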